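-- pv_equiv track=rewrite | github.com/hmk252/ARC-9th-place | src/arc_2020_ensemble_26_solutions.py | VertSym
-- ===== SOURCE A (Python) =====
-- def VertSym(x):
--     n = len(x)
--     k = len(x[0])
--     PossibleS = []
--
--     for s in range(1, 2 * k - 2):
--         possible = True
--         for i in range(n):
--             for j in range(k):
--                 j1 = s - j
--                 if j1 < 0 or j1 >= k:
--                     continue
--                 color1 = x[i][j]
--                 color2 = x[i][j1]
--                 if color1 != color2:
--                     possible = False
--                     break
--         if possible:
--             PossibleS.append(s)
--     if len(PossibleS) == 0:
--         return []
--
--     Scores = []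
--     for s in PossibleS:
--         Scores.append((abs(s - k + 1), s))
--     Scores.sort()
--     Best_s = Scores[0][1]
--     s = Best_s
--     Ans = []
--
--     for i in range(n):
--         for j in range(k):
--             j1 = s - j
--             if j1 < 0 or j1 >= k:
--                 continue
--             a = (i, j)
--             b = (i, j1)
--             if [a, b] in Ans or [b, a] in Ans or a == b:
--                 continue
--             Ans.append([a, b])
--     return Ans
-- ===== SOURCE B (Python) =====
-- def VertSym(x):
--     n = len(x)
--     k = len(x[0])
--     best = None
--     for s in range(1, 2 * k - 2):
--         if all(x[i][j] == x[i][s - j]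
--                for i in range(n)
--                for j in range(max(0, s - k + 1), min(k, s + 1))):
--             key = (abs(s - k + 1), s)
--             if best is None or key < best:
--                 best = key
--     if best is None:
--         return []
--     s = best[1]
--     return [[(i, j), (i, s - j)]
--             for i in range(n)
--             for j in range(max(0, s - k + 1), min(k, s + 1))
--             if j < s - j]
-- ===== Notes on version B (the rewrite author's own statement) =====
-- stated objective: faster
-- what changed: Replaces A's collect-all-axes list + tuple sort + quadratic membership-dedup output loop with a single min-tracking pass over the axes (no sort, no PossibleS/Scores lists) and a direct j < s-j comprehension over the clipped range that emits each mirror pair exactly once.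
import Mathlib
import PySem

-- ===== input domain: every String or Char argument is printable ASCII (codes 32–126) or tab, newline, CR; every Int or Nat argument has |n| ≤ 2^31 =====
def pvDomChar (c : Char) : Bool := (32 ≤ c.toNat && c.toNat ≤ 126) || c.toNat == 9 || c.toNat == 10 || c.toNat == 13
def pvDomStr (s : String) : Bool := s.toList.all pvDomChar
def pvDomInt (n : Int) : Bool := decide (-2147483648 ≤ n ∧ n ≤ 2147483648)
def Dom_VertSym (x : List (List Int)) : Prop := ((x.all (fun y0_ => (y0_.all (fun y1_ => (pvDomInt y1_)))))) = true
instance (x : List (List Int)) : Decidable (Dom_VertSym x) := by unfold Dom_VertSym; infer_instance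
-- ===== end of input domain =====

-- B replaces A's build-all-axes list + sort + quadratic membership-dedup output loop by a single
-- min-tracking pass over the axes and a direct j < s-j comprehension for the pairs (return values only;
-- neither version mutates its argument).

-- ===== PORT A =====
-- the j-loop of the symmetry check, with its early 'break' on a mismatch
def aRow (row : List Int) (k s : Int) : List Int → Bool
  | [] => true
  | j :: rest =>
    let j1 := s - j
    if j1 < 0 ∨ k ≤ j1 then aRow row k s rest
    else if PySem.List.pyGetD row j 0 ≠ PySem.List.pyGetD row j1 0 then false
    else aRow row k s rest

-- the i-loop: 'possible' stays false once a row failed (the break only leaves the j-loop)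
def aPossible (x : List (List Int)) (n k s : Int) : Bool :=
  (PySem.List.pyRange 0 n).foldl
    (fun p i => if aRow (PySem.List.pyGetD x i []) k s (PySem.List.pyRange 0 k) then p else false) true

def VertSym (x : List (List Int)) : List (List (Int × Int)) :=
  let n : Int := x.length
  let k : Int := (x.headD []).length   -- x[0]: IndexError on empty x (excluded by Pre_)
  let possibleS : List Int :=
    (PySem.List.pyRange 1 (2 * k - 2)).foldl
      (fun acc s => if aPossible x n k s then acc ++ [s] else acc) []
  if possibleS = [] then []
  else
    let scores : List (Int × Int) := possibleS.foldl (fun acc s => acc ++ [(|s - k + 1|, s)]) []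
    let sortedScores := PySem.List.sorted2 scores Prod.fst Prod.snd
    let bestS := (PySem.List.pyGetD sortedScores 0 (0, 0)).2
    (PySem.List.pyRange 0 n).foldl (fun ans i =>
      (PySem.List.pyRange 0 k).foldl (fun ans j =>
        let j1 := bestS - j
        if j1 < 0 ∨ k ≤ j1 then ans
        else
          let a : Int × Int := (i, j)
          let b : Int × Int := (i, j1)
          if [a, b] ∈ ans ∨ [b, a] ∈ ans ∨ a = b then ans
          else ans ++ [[a, b]]) ans) []

-- ===== PORT B =====
-- all(x[i][j] == x[i][s-j] for i in range(n) for j in range(max(0,s-k+1), min(k,s+1)))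
def bCheck (x : List (List Int)) (n k s : Int) : Bool :=
  (PySem.List.pyRange 0 n).all fun i =>
    (PySem.List.pyRange (max 0 (s - k + 1)) (min k (s + 1))).all fun j =>
      PySem.List.pyGetD (PySem.List.pyGetD x i []) j 0 == PySem.List.pyGetD (PySem.List.pyGetD x i []) (s - j) 0

-- Python tuple comparison 'key < best' on int pairs
def bLt (p q : Int × Int) : Bool := p.1 < q.1 || (p.1 == q.1 && p.2 < q.2)

-- the body of Source B's best-axis scan: keep the smaller of 'best' and the key of a symmetric axis
def bStep (C : Int → Bool) (key : Int → Int × Int) (b : Option (Int × Int)) (s : Int) : Option (Int × Int) :=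
  if C s then
    match b with
    | none => some (key s)
    | some m => if bLt (key s) m then some (key s) else some m
  else b

def VertSym_alt (x : List (List Int)) : List (List (Int × Int)) :=
  let n : Int := x.length
  let k : Int := (x.headD []).length   -- x[0]: IndexError on empty x (excluded by Pre_)
  let best := (PySem.List.pyRange 1 (2 * k - 2)).foldl
    (bStep (bCheck x n k) (fun s => (|s - k + 1|, s))) none
  match best with
  | none => []
  | some m =>
    let s := m.2
    (PySem.List.pyRange 0 n).flatMap fun i =>
      ((PySem.List.pyRange (max 0 (s - k + 1)) (min k (s + 1))).filter (fun j => decide (j < s - j))).map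
        fun j => [(i, j), (i, s - j)]

-- ===== PRECONDITION & SPEC =====
-- Pre_ is exactly where the Python A returns: x[0] raises IndexError on empty x, and (only when the first
-- row has ≥ 2 cells, so that the axis range is nonempty) every row must reach the width k of row 0,
-- otherwise x[i][j] / x[i][s-j] raises IndexError already at s = 1.
def Pre_VertSym (x : List (List Int)) : Prop :=
  x ≠ [] ∧ (2 ≤ (x.headD []).length → ∀ row ∈ x, (x.headD []).length ≤ row.length)
instance (x : List (List Int)) : Decidable (Pre_VertSym x) := by unfold Pre_VertSym; infer_instance
def pvWitness_VertSym : List (List Int) := [[1, 2, 1], [3, 0, 3]]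

def Spec_VertSym (x : List (List Int)) (out : List (List (Int × Int))) : Prop := out = VertSym_alt x
instance (x : List (List Int)) (out : List (List (Int × Int))) : Decidable (Spec_VertSym x out) := by unfold Spec_VertSym; infer_instance

-- ===== CLAIM (what is proved, stated in full; the proofs are below) =====
def Claim_equal_VertSym : Prop := ∀ (x : List (List Int)), Dom_VertSym x → Pre_VertSym x → Spec_VertSym x (VertSym x)

-- ===== LEMMAS AND PROOFS =====

-- Prop forms of the two Bool comparators
def lexLt (p q : Int × Int) : Prop := p.1 < q.1 ∨ (p.1 = q.1 ∧ p.2 < q.2)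
def lexLe (p q : Int × Int) : Prop := p.1 < q.1 ∨ (p.1 = q.1 ∧ p.2 ≤ q.2)

theorem bLt_iff (p q : Int × Int) : bLt p q = true ↔ lexLt p q := by
  simp [bLt, lexLt]

-- the comparator sorted2 uses for the keys (fst, snd)
def sLt (p q : Int × Int) : Bool := decide (p.1 < q.1) || (!decide (q.1 < p.1) && decide (p.2 < q.2))

theorem sLt_iff (p q : Int × Int) : sLt p q = true ↔ lexLt p q := by
  simp [sLt, lexLt]; omega

-- A's guarded accumulation of 'possible' over the rows is an 'all'
theorem foldl_and_if (f : Int → Bool) (l : List Int) (p : Bool) :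
    l.foldl (fun p i => if f i then p else false) p = (p && l.all f) := by
  induction l generalizing p with
  | nil => simp
  | cons a t ih =>
    rw [List.foldl_cons, List.all_cons]
    cases f a
    · rw [if_neg (by simp), ih]
      cases p <;> simp
    · rw [if_pos rfl, ih]
      cases p <;> simp

-- A's j-loop with break = an 'all' over the same range
theorem aRow_eq_all (row : List Int) (k s : Int) (js : List Int) :
    aRow row k s js = js.all fun j =>
      decide (s - j < 0 ∨ k ≤ s - j) || (PySem.List.pyGetD row j 0 == PySem.List.pyGetD row (s - j) 0) := by
  induction js with
  | nil => rfl
  | cons j rest ih =>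
    simp only [aRow, List.all_cons]
    split_ifs with h1 h2 <;> simp_all

-- A's skip-guarded scan over range(k) = B's scan over the clipped range
theorem row_all_eq (row : List Int) (k s : Int) :
    ((PySem.List.pyRange 0 k).all fun j =>
      decide (s - j < 0 ∨ k ≤ s - j) || (PySem.List.pyGetD row j 0 == PySem.List.pyGetD row (s - j) 0))
    = ((PySem.List.pyRange (max 0 (s - k + 1)) (min k (s + 1))).all fun j =>
      PySem.List.pyGetD row j 0 == PySem.List.pyGetD row (s - j) 0) := by
  rw [Bool.eq_iff_iff]
  simp only [List.all_eq_true, PySem.List.mem_pyRange_one, Bool.or_eq_true, decide_eq_true_iff]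
  constructor
  · intro h j hj
    rcases h j (by omega) with h' | h'
    · omega
    · exact h'
  · intro h j hj
    by_cases hc : s - j < 0 ∨ k ≤ s - j
    · exact Or.inl hc
    · exact Or.inr (h j (by omega))

-- the per-axis checks of the two ports agree
theorem check_eq (x : List (List Int)) (n k s : Int) : aPossible x n k s = bCheck x n k s := by
  unfold aPossible bCheck
  rw [foldl_and_if, Bool.true_and]
  refine List.all_congr rfl fun i => ?_
  rw [aRow_eq_all, row_all_eq]

-- ---- B's min-tracking fold, characterised ----

theorem bestFold_spec (C : Int → Bool) (key : Int → Int × Int) (l : List Int) :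
    ∀ (b : Option (Int × Int)),
      ((l.foldl (bStep C key) b = none) ↔ (b = none ∧ ∀ s ∈ l, C s = false)) ∧
      (∀ m, l.foldl (bStep C key) b = some m →
        (b = some m ∨ ∃ s ∈ l, C s = true ∧ key s = m) ∧
        (∀ m₀, b = some m₀ → lexLe m m₀) ∧
        (∀ s ∈ l, C s = true → lexLe m (key s))) := by
  induction l with
  | nil =>
    intro b
    refine ⟨by simp, ?_⟩
    intro m hm
    simp only [List.foldl_nil] at hm
    subst hm
    refine ⟨Or.inl rfl, ?_, by simp⟩
    intro m₀ h
    injection h with h'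
    subst h'
    exact Or.inr ⟨rfl, le_rfl⟩
  | cons u t ih =>
    intro b
    rw [List.foldl_cons]
    by_cases hc : C u = true
    case neg =>
      have hcf : C u = false := by simpa using hc
      have hbs : bStep C key b u = b := by simp [bStep, hcf]
      rw [hbs]
      obtain ⟨ih1, ih2⟩ := ih b
      constructor
      · rw [ih1]
        constructor
        · rintro ⟨h1, h2⟩
          exact ⟨h1, fun v hv => (List.mem_cons.1 hv).elim (fun h => h ▸ hcf) (h2 v)⟩
        · rintro ⟨h1, h2⟩
          exact ⟨h1, fun v hv => h2 v (List.mem_cons_of_mem _ hv)⟩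
      · intro m hm
        obtain ⟨g1, g2, g3⟩ := ih2 m hm
        refine ⟨?_, g2, ?_⟩
        · rcases g1 with h | ⟨v, hv, h1, h2⟩
          · exact Or.inl h
          · exact Or.inr ⟨v, List.mem_cons_of_mem _ hv, h1, h2⟩
        · intro v hv hcv
          rcases List.mem_cons.1 hv with rfl | hv'
          · exact absurd hcv (by simp [hcf])
          · exact g3 v hv' hcv
    case pos =>
      obtain ⟨b', hb', hmem', hle_b, hle_key⟩ :
          ∃ b', bStep C key b u = some b' ∧ (b' = key u ∨ b = some b') ∧
            (∀ m₀, b = some m₀ → lexLe b' m₀) ∧ lexLe b' (key u) := by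
        cases b with
        | none =>
          refine ⟨key u, by simp [bStep, hc], Or.inl rfl, ?_, Or.inr ⟨rfl, le_rfl⟩⟩
          intro m₀ h
          cases h
        | some m₀ =>
          by_cases hlt : bLt (key u) m₀ = true
          · have h' := (bLt_iff _ _).1 hlt
            refine ⟨key u, by simp [bStep, hc, hlt], Or.inl rfl, ?_, Or.inr ⟨rfl, le_rfl⟩⟩
            intro m₁ h₁
            injection h₁ with h₁
            subst h₁
            unfold lexLt at h'
            unfold lexLe
            omega
          · have h' : ¬ lexLt (key u) m₀ := fun hh => hlt ((bLt_iff _ _).2 hh)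
            refine ⟨m₀, by simp [bStep, hc, hlt], Or.inr rfl, ?_, ?_⟩
            · intro m₁ h₁
              injection h₁ with h₁
              subst h₁
              exact Or.inr ⟨rfl, le_rfl⟩
            · unfold lexLt at h'
              unfold lexLe
              omega
      rw [hb']
      obtain ⟨ih1, ih2⟩ := ih (some b')
      constructor
      · rw [ih1]
        constructor
        · rintro ⟨h, _⟩
          cases h
        · rintro ⟨_, h2⟩
          exact absurd (h2 u (List.mem_cons_self)) (by simp [hc])
      · intro m hm
        obtain ⟨g1, g2, g3⟩ := ih2 m hm
        have hmb' : lexLe m b' := g2 b' rfl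
        refine ⟨?_, ?_, ?_⟩
        · rcases g1 with h | ⟨v, hv, h1, h2⟩
          · injection h with h
            subst h
            rcases hmem' with h | h
            · exact Or.inr ⟨u, List.mem_cons_self, hc, h.symm⟩
            · exact Or.inl h
          · exact Or.inr ⟨v, List.mem_cons_of_mem _ hv, h1, h2⟩
        · intro m₀ hb
          have h1 := hle_b m₀ hb
          unfold lexLe at *
          omega
        · intro v hv hcv
          rcases List.mem_cons.1 hv with rfl | hv'
          · have := hle_key
            unfold lexLe at *
            omega
          · exact g3 v hv' hcv

-- ---- head-minimality of sorted2 (insertion sort with the lex comparator) ----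

theorem insertBy_sLt_nil (z : Int × Int) : PySem.List.insertBy sLt z [] = [z] := rfl

theorem insertBy_sLt_cons (z w : Int × Int) (ws : List (Int × Int)) :
    PySem.List.insertBy sLt z (w :: ws) =
      if sLt z w then z :: w :: ws else w :: PySem.List.insertBy sLt z ws := rfl

-- "the head is a lex-minimum of the list"
def HeadMin (l : List (Int × Int)) : Prop := ∀ h t, l = h :: t → ∀ y ∈ l, sLt y h = false

theorem headMin_insertBy (z : Int × Int) (ys : List (Int × Int)) (hys : HeadMin ys) :
    HeadMin (PySem.List.insertBy sLt z ys) := by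
  cases ys with
  | nil =>
    rw [insertBy_sLt_nil]
    intro h t heq y hy
    injection heq with e1 e2
    subst e1; subst e2
    rw [List.mem_singleton] at hy
    subst hy
    simp [sLt]
  | cons w ws =>
    have hw : ∀ y ∈ w :: ws, sLt y w = false := hys w ws rfl
    rw [insertBy_sLt_cons]
    by_cases hzw : sLt z w = true
    · rw [if_pos hzw]
      intro h t heq y hy
      injection heq with e1 e2
      subst e1; subst e2
      rcases List.mem_cons.1 hy with rfl | hy'
      · simp [sLt]
      · have hyw : sLt y w = false := hw y hy'
        have h1 : ¬ lexLt y w := fun hh => by simp [(sLt_iff _ _).2 hh] at hyw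
        have h2 : lexLt z w := (sLt_iff _ _).1 hzw
        have h3 : ¬ lexLt y z := by unfold lexLt at *; omega
        exact Bool.eq_false_iff.2 fun hh => h3 ((sLt_iff _ _).1 hh)
    · rw [if_neg hzw]
      intro h t heq y hy
      injection heq with e1 e2
      subst e1; subst e2
      rcases List.mem_cons.1 hy with rfl | hy'
      · simp [sLt]
      · rcases (PySem.List.mem_insertBy _ _ _ _).1 hy' with rfl | hyw
        · exact Bool.eq_false_iff.2 hzw
        · exact hw y (List.mem_cons_of_mem _ hyw)

theorem headMin_sorted2 (xs : List (Int × Int)) : HeadMin (PySem.List.sorted2 xs Prod.fst Prod.snd) := by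
  have hfold : ∀ (l acc : List (Int × Int)), HeadMin acc →
      HeadMin (l.foldl (fun acc x => PySem.List.insertBy sLt x acc) acc) := by
    intro l
    induction l with
    | nil => intro acc h; exact h
    | cons a t ih => intro acc h; exact ih _ (headMin_insertBy a acc h)
  have hrfl : PySem.List.sorted2 xs Prod.fst Prod.snd
      = xs.foldl (fun acc x => PySem.List.insertBy sLt x acc) [] := rfl
  rw [hrfl]
  exact hfold xs [] (by intro h t heq y hy; cases heq)

-- ---- the emitted pair lists ----

def emit (s i a b : Int) : List (List (Int × Int)) :=
  ((PySem.List.pyRange a b).filter (fun j => decide (j < s - j))).map fun j => [(i, j), (i, s - j)]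

def emitAll (s k : Int) (a b : Int) : List (List (Int × Int)) :=
  (PySem.List.pyRange a b).flatMap fun i => emit s i (max 0 (s - k + 1)) (min k (s + 1))

theorem emit_mem_fst {s i a b : Int} {p : List (Int × Int)} (hp : p ∈ emit s i a b) :
    ∀ q ∈ p, q.1 = i := by
  unfold emit at hp
  obtain ⟨j, _, rfl⟩ := List.mem_map.1 hp
  intro q hq
  rcases List.mem_cons.1 hq with rfl | hq <;> simp_all

theorem emitAll_mem_fst {s k a b : Int} :
    ∀ r ∈ emitAll s k a b, ∀ q ∈ r, a ≤ q.1 ∧ q.1 < b := by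
  intro r hr q hq
  unfold emitAll at hr
  obtain ⟨i, hi, hri⟩ := List.mem_flatMap.1 hr
  have := emit_mem_fst hri q hq
  rw [this]
  exact PySem.List.mem_pyRange_one.1 hi

theorem emit_succ (s i a c : Int) (hac : a ≤ c) :
    emit s i a (c + 1) = emit s i a c ++ (if c < s - c then [[(i, c), (i, s - c)]] else []) := by
  unfold emit
  rw [PySem.List.pyRange_one_succ_right hac, List.filter_append, List.map_append]
  by_cases h : c < s - c <;> simp [h]

theorem foldl_skip {β : Type} (l : List Int) (acc : β) : l.foldl (fun a _ => a) acc = acc := by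
  induction l generalizing acc with
  | nil => rfl
  | cons a t ih => rw [List.foldl_cons]; exact ih acc

-- A's inner j-loop over range(k), with the skip guard, equals the loop over the clipped range
theorem inner_restrict (k s : Int) (hs1 : 1 ≤ s) (hs2 : s ≤ 2 * k - 3)
    (body : List (List (Int × Int)) → Int → List (List (Int × Int))) (acc : List (List (Int × Int))) :
    (PySem.List.pyRange 0 k).foldl
      (fun ans j => if s - j < 0 ∨ k ≤ s - j then ans else body ans j) acc
    = (PySem.List.pyRange (max 0 (s - k + 1)) (min k (s + 1))).foldl body acc := by
  have h0m1 : (0:Int) ≤ max 0 (s - k + 1) := le_max_left _ _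
  have hm1m2 : max 0 (s - k + 1) ≤ min k (s + 1) := by omega
  have hm2k : min k (s + 1) ≤ k := min_le_left _ _
  rw [PySem.List.pyRange_one_append 0 (max 0 (s - k + 1)) k h0m1 (by omega),
      PySem.List.pyRange_one_append (max 0 (s - k + 1)) (min k (s + 1)) k hm1m2 hm2k,
      List.foldl_append, List.foldl_append]
  have e1 : (PySem.List.pyRange 0 (max 0 (s - k + 1))).foldl
      (fun ans j => if s - j < 0 ∨ k ≤ s - j then ans else body ans j) acc = acc := by
    refine Eq.trans (PySem.List.foldl_congr_mem _ _ (fun a _ => a) _ ?_) (foldl_skip _ _)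
    intro a j hj
    have hb := PySem.List.mem_pyRange_one.1 hj
    rw [if_pos (by omega)]
  rw [e1]
  have e2 : (PySem.List.pyRange (max 0 (s - k + 1)) (min k (s + 1))).foldl
      (fun ans j => if s - j < 0 ∨ k ≤ s - j then ans else body ans j) acc
      = (PySem.List.pyRange (max 0 (s - k + 1)) (min k (s + 1))).foldl body acc := by
    apply PySem.List.foldl_congr_mem
    intro a j hj
    have hb := PySem.List.mem_pyRange_one.1 hj
    rw [if_neg (by omega)]
  rw [e2]
  refine Eq.trans (PySem.List.foldl_congr_mem _ _ (fun a _ => a) _ ?_) (foldl_skip _ _)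
  intro a j hj
  have hb := PySem.List.mem_pyRange_one.1 hj
  rw [if_pos (by omega)]

-- the invariant of A's inner loop: the membership dedup is exactly the j < s - j filter
theorem inner_invariant (k s : Int) (i : Int)
    (A0 : List (List (Int × Int))) (hA0 : ∀ p ∈ A0, ∀ q ∈ p, q.1 ≠ i) :
    ∀ (d : Nat) (jc : Int), max 0 (s - k + 1) ≤ jc → jc ≤ min k (s + 1) →
      (min k (s + 1) - jc).toNat = d →
    (PySem.List.pyRange jc (min k (s + 1))).foldl
      (fun ans j =>
        if [((i, j) : Int × Int), (i, s - j)] ∈ ans ∨ [((i, s - j) : Int × Int), (i, j)] ∈ ans ∨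
            ((i, j) : Int × Int) = (i, s - j)
        then ans else ans ++ [[(i, j), (i, s - j)]])
      (A0 ++ emit s i (max 0 (s - k + 1)) jc)
    = A0 ++ emit s i (max 0 (s - k + 1)) (min k (s + 1)) := by
  intro d
  induction d with
  | zero =>
    intro jc h1 h2 h3
    have he : jc = min k (s + 1) := by omega
    subst he
    rw [PySem.List.pyRange_one_eq_nil le_rfl, List.foldl_nil]
  | succ d ihd =>
    intro jc h1 h2 h3
    have hlt : jc < min k (s + 1) := by omega
    rw [PySem.List.pyRange_one_cons hlt, List.foldl_cons]
    have hjk : jc < k := by omega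
    have hjs : jc ≤ s := by omega
    by_cases hj : jc < s - jc
    · have hcond : ¬ ([((i, jc) : Int × Int), (i, s - jc)] ∈ A0 ++ emit s i (max 0 (s - k + 1)) jc ∨
          [((i, s - jc) : Int × Int), (i, jc)] ∈ A0 ++ emit s i (max 0 (s - k + 1)) jc ∨
          ((i, jc) : Int × Int) = (i, s - jc)) := by
        rintro (h | h | h)
        · rcases List.mem_append.1 h with h' | h'
          · exact hA0 _ h' (i, jc) (by simp) rfl
          · obtain ⟨j', hj', heq⟩ := List.mem_map.1 h'
            have hf := List.mem_filter.1 hj'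
            have hmem := PySem.List.mem_pyRange_one.1 hf.1
            simp only [List.cons.injEq, Prod.mk.injEq, and_true] at heq
            omega
        · rcases List.mem_append.1 h with h' | h'
          · exact hA0 _ h' (i, s - jc) (by simp) rfl
          · obtain ⟨j', hj', heq⟩ := List.mem_map.1 h'
            have hf := List.mem_filter.1 hj'
            have hlt' := of_decide_eq_true hf.2
            simp only [List.cons.injEq, Prod.mk.injEq, and_true] at heq
            omega
        · simp only [Prod.mk.injEq, true_and] at h
          omega
      rw [if_neg hcond]
      have hstart : (A0 ++ emit s i (max 0 (s - k + 1)) jc) ++ [[((i, jc) : Int × Int), (i, s - jc)]]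
          = A0 ++ emit s i (max 0 (s - k + 1)) (jc + 1) := by
        rw [emit_succ s i _ jc h1, if_pos hj, List.append_assoc]
      rw [hstart]
      exact ihd (jc + 1) (by omega) (by omega) (by omega)
    · have hcond : ([((i, jc) : Int × Int), (i, s - jc)] ∈ A0 ++ emit s i (max 0 (s - k + 1)) jc ∨
          [((i, s - jc) : Int × Int), (i, jc)] ∈ A0 ++ emit s i (max 0 (s - k + 1)) jc ∨
          ((i, jc) : Int × Int) = (i, s - jc)) := by
        by_cases he : jc = s - jc
        · exact Or.inr (Or.inr (by rw [← he]))
        · have hlt' : s - jc < jc := by omega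
          refine Or.inr (Or.inl (List.mem_append.2 (Or.inr ?_)))
          refine List.mem_map.2 ⟨s - jc, List.mem_filter.2 ⟨PySem.List.mem_pyRange_one.2 ⟨by omega, hlt'⟩, by simp; omega⟩, ?_⟩
          have hss : s - (s - jc) = jc := by omega
          rw [hss]
      rw [if_pos hcond]
      have hstart : A0 ++ emit s i (max 0 (s - k + 1)) jc
          = A0 ++ emit s i (max 0 (s - k + 1)) (jc + 1) := by
        rw [emit_succ s i _ jc h1, if_neg hj, List.append_nil]
      rw [hstart]
      exact ihd (jc + 1) (by omega) (by omega) (by omega)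

-- the outer i-loop builds exactly B's comprehension
theorem outer_invariant (n k s : Int) (hs1 : 1 ≤ s) (hs2 : s ≤ 2 * k - 3) :
    ∀ (d : Nat) (ic : Int), 0 ≤ ic → ic ≤ n → (n - ic).toNat = d →
    (PySem.List.pyRange ic n).foldl (fun ans i =>
      (PySem.List.pyRange 0 k).foldl (fun ans j =>
        if s - j < 0 ∨ k ≤ s - j then ans
        else
          if [((i, j) : Int × Int), (i, s - j)] ∈ ans ∨ [((i, s - j) : Int × Int), (i, j)] ∈ ans ∨
              ((i, j) : Int × Int) = (i, s - j)
          then ans else ans ++ [[(i, j), (i, s - j)]]) ans) (emitAll s k 0 ic)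
    = emitAll s k 0 n := by
  intro d
  induction d with
  | zero =>
    intro ic h1 h2 h3
    have he : ic = n := by omega
    subst he
    rw [PySem.List.pyRange_one_eq_nil le_rfl, List.foldl_nil]
  | succ d ihd =>
    intro ic h1 h2 h3
    have hlt : ic < n := by omega
    rw [PySem.List.pyRange_one_cons hlt, List.foldl_cons]
    have hrow : (PySem.List.pyRange 0 k).foldl (fun ans j =>
        if s - j < 0 ∨ k ≤ s - j then ans
        else
          if [((ic, j) : Int × Int), (ic, s - j)] ∈ ans ∨ [((ic, s - j) : Int × Int), (ic, j)] ∈ ans ∨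
              ((ic, j) : Int × Int) = (ic, s - j)
          then ans else ans ++ [[(ic, j), (ic, s - j)]]) (emitAll s k 0 ic)
        = emitAll s k 0 (ic + 1) := by
      rw [inner_restrict k s hs1 hs2]
      have hA0 : ∀ p ∈ emitAll s k 0 ic, ∀ q ∈ p, q.1 ≠ ic := by
        intro p hp q hq
        have := emitAll_mem_fst p hp q hq
        omega
      have hstart : emitAll s k 0 ic
          = emitAll s k 0 ic ++ emit s ic (max 0 (s - k + 1)) (max 0 (s - k + 1)) := by
        unfold emit
        rw [PySem.List.pyRange_one_eq_nil le_rfl]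
        simp
      rw [hstart, inner_invariant k s ic _ hA0 (min k (s + 1) - max 0 (s - k + 1)).toNat
        (max 0 (s - k + 1)) le_rfl (by omega) rfl]
      unfold emitAll
      rw [PySem.List.pyRange_one_succ_right h1, List.flatMap_append]
      simp
    rw [hrow]
    exact ihd (ic + 1) (by omega) (by omega) (by omega)

-- ===== VERDICT (by name: the statement is the Claim_ definition above) =====
theorem VertSym_spec : Claim_equal_VertSym := by
  intro x _hdom _hpre
  show VertSym x = VertSym_alt x
  simp only [VertSym, VertSym_alt]
  set n : Int := (x.length : Int) with hn
  set k : Int := ((x.headD []).length : Int) with hk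
  have hposs : (PySem.List.pyRange 1 (2 * k - 2)).foldl
      (fun acc s => if aPossible x n k s then acc ++ [s] else acc) []
      = (PySem.List.pyRange 1 (2 * k - 2)).filter (bCheck x n k) := by
    rw [PySem.List.foldl_append_if (fun s => aPossible x n k s) (fun s => s)]
    rw [List.filter_congr (fun s _ => check_eq x n k s)]
    simp
  rw [hposs]
  by_cases hne : (PySem.List.pyRange 1 (2 * k - 2)).filter (bCheck x n k) = []
  · rw [if_pos hne]
    have hnone : (PySem.List.pyRange 1 (2 * k - 2)).foldl
        (bStep (bCheck x n k) (fun s => (|s - k + 1|, s))) none = none := by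
      rw [(bestFold_spec _ _ _ _).1]
      refine ⟨rfl, fun s hs => ?_⟩
      by_contra hcs
      have : s ∈ (PySem.List.pyRange 1 (2 * k - 2)).filter (bCheck x n k) :=
        List.mem_filter.2 ⟨hs, by simpa using hcs⟩
      simp [hne] at this
    rw [hnone]
  · rw [if_neg hne]
    -- the best fold returns some m
    obtain ⟨s0, hs0⟩ := List.exists_mem_of_ne_nil _ hne
    have hs0' := List.mem_filter.1 hs0
    rcases hfold : (PySem.List.pyRange 1 (2 * k - 2)).foldl
        (bStep (bCheck x n k) (fun s => (|s - k + 1|, s))) none with _ | m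
    · exfalso
      have := ((bestFold_spec _ _ _ _).1.1 hfold).2 s0 hs0'.1
      simp [hs0'.2] at this
    obtain ⟨hmem, _, hmin⟩ := (bestFold_spec _ _ _ _).2 m hfold
    rcases hmem with h | ⟨sm, hsm, hcsm, hksm⟩
    · cases h
    -- A's scores list
    have hscores : ((PySem.List.pyRange 1 (2 * k - 2)).filter (bCheck x n k)).foldl
        (fun acc s => acc ++ [(|s - k + 1|, s)]) ([] : List (Int × Int))
        = ((PySem.List.pyRange 1 (2 * k - 2)).filter (bCheck x n k)).map (fun s => (|s - k + 1|, s)) := by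
      rw [PySem.List.foldl_append_singleton_eq_map]
      simp
    rw [hscores]
    set scores := ((PySem.List.pyRange 1 (2 * k - 2)).filter (bCheck x n k)).map
      (fun s => (|s - k + 1|, s)) with hsc
    -- the sorted list is nonempty
    have hsne : PySem.List.sorted2 scores Prod.fst Prod.snd ≠ [] := by
      intro h
      have hlen := (PySem.List.sorted2_perm scores Prod.fst Prod.snd false).length_eq
      rw [h] at hlen
      have hs0 : scores = [] := List.length_eq_zero_iff.1 hlen.symm
      rw [hsc] at hs0
      exact hne (List.map_eq_nil_iff.1 hs0)
    rcases hsort : PySem.List.sorted2 scores Prod.fst Prod.snd with _ | ⟨hd, tl⟩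
    · exact absurd hsort hsne
    have hhead : PySem.List.pyGetD (hd :: tl) 0 ((0 : Int), (0 : Int)) = hd := by
      rw [PySem.List.pyGetD_zero]
      rfl
    rw [hhead]
    -- hd is a member of scores and a lex lower bound of scores
    have hperm := PySem.List.sorted2_perm scores Prod.fst Prod.snd false
    rw [hsort] at hperm
    have hhd_mem : hd ∈ scores := hperm.mem_iff.1 (List.mem_cons_self)
    have hlb : ∀ y ∈ scores, sLt y hd = false := by
      intro y hy
      exact (headMin_sorted2 scores) hd tl hsort y (by rw [hsort]; exact (hperm.mem_iff).2 hy)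
    -- m is a member of scores
    have hm_mem : m ∈ scores := by
      rw [hsc]
      exact List.mem_map.2 ⟨sm, List.mem_filter.2 ⟨hsm, hcsm⟩, hksm⟩
    -- hd = key s_h for some s_h that passes the check, so m ≤ hd
    obtain ⟨sh, hsh, hksh⟩ := List.mem_map.1 (hsc ▸ hhd_mem)
    have hsh' := List.mem_filter.1 hsh
    have hksh' : ((|sh - k + 1|, sh) : Int × Int) = hd := hksh
    have hmle : lexLe m hd := by
      have h := hmin sh hsh'.1 hsh'.2
      rwa [hksh'] at h
    have hnlt : ¬ lexLt m hd := by
      intro hh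
      have h1 := hlb m hm_mem
      rw [(sLt_iff m hd).2 hh] at h1
      exact absurd h1 (by simp)
    have hmhd : m = hd := by
      have h1 : m.1 = hd.1 ∧ m.2 = hd.2 := by
        unfold lexLe at hmle
        unfold lexLt at hnlt
        omega
      exact Prod.ext h1.1 h1.2
    subst hmhd
    -- both sides now build the pair list for the same axis m.2
    have hksm' : ((|sm - k + 1|, sm) : Int × Int) = m := hksm
    have hms : m.2 = sm := by rw [← hksm']
    have hb1 : 1 ≤ m.2 := by
      have := PySem.List.mem_pyRange_one.1 hsm
      omega
    have hb2 : m.2 ≤ 2 * k - 3 := by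
      have := PySem.List.mem_pyRange_one.1 hsm
      omega
    have hinit : emitAll m.2 k 0 0 = [] := by
      unfold emitAll
      rw [PySem.List.pyRange_one_eq_nil le_rfl]
      rfl
    have h0n : (0 : Int) ≤ n := by rw [hn]; exact Int.natCast_nonneg _
    have hA := outer_invariant n k m.2 hb1 hb2 n.toNat 0 le_rfl h0n (by simp)
    rw [hinit] at hA
    exact hA.trans rfl
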